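-- pv_equiv track=rewrite | github.com/mikedee56/Post-Processing-Shruti | src/ner_module/ner_model_manager.py | _generate_next_version
-- ===== SOURCE A (Python) =====
-- from typing import Dict, List, Tuple, Optional, Any, Set
--
-- def _generate_next_version(current_versions: List[str]) -> str:
--     """Generate the next version number."""
--     if not current_versions:
--         return "1.0.0"
--
--     # Find highest version (simplified)
--     versions = []
--     for v in current_versions:
--         try:
--             parts = v.split('.')
--             versions.append((int(parts[0]), int(parts[1]), int(parts[2])))
--         except:
--             continue
--
--     if not versions:
--         return "1.0.0"
--
--     versions.sort(reverse=True)
--     major, minor, patch = versions[0]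
--
--     # Increment patch version
--     return f"{major}.{minor}.{patch + 1}"
-- ===== SOURCE B (Python) =====
-- def _generate_next_version(current_versions):
--     """Generate the next version number."""
--     best = None
--     for v in current_versions:
--         try:
--             parts = v.split('.')
--             cand = (int(parts[0]), int(parts[1]), int(parts[2]))
--         except:
--             continue
--         if best is None or cand > best:
--             best = cand
--     if best is None:
--         return "1.0.0"
--     major, minor, patch = best
--     return f"{major}.{minor}.{patch + 1}"
-- ===== Notes on version B (the rewrite author's own statement) =====
-- stated objective: simpler
-- what changed: Replaces the build-a-list-then-sort(reverse=True) pass with a single linear scan that threads one running-best tuple through the parse loop; no intermediate list, no sort, and the empty-list guard collapses into the best-is-None check.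
import Mathlib
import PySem

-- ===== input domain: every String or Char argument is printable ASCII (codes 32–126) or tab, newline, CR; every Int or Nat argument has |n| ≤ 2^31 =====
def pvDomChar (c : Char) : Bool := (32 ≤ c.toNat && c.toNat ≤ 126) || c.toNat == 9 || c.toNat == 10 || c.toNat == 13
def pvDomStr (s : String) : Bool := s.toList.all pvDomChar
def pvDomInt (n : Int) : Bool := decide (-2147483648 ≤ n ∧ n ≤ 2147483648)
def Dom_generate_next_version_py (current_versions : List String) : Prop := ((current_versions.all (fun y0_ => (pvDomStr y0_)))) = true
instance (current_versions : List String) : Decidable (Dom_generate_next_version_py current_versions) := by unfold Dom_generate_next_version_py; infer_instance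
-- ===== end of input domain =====

-- B replaces A's list-building + sort(reverse=True) with one linear pass keeping a running-best tuple (simpler).

-- ===== PORT A =====
-- the try-block: v.split('.'); (int(parts[0]), int(parts[1]), int(parts[2])); none = any exception (bare except)
def pvParseVer (v : String) : Option (Int × Int × Int) :=
  -- '.'.split is never empty-separator, so split? is always 'some'; the [] default is unreachable
  let parts := (PySem.Str.split? v ".").getD []
  match PySem.List.pyGet? parts 0 with
  | none => none
  | some p0 =>
    match PySem.Int.ofStr? p0 with
    | none => none
    | some a =>
      match PySem.List.pyGet? parts 1 with
      | none => none
      | some p1 =>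
        match PySem.Int.ofStr? p1 with
        | none => none
        | some b =>
          match PySem.List.pyGet? parts 2 with
          | none => none
          | some p2 =>
            match PySem.Int.ofStr? p2 with
            | none => none
            | some c => some (a, b, c)

-- Python sorts tuples lexicographically; the key 'toLex' names exactly that order on Int × Int × Int
def pvKey (t : Int × Int × Int) : Int ×ₗ (Int ×ₗ Int) := toLex (t.1, toLex t.2)

def generate_next_version_py (current_versions : List String) : String :=
  if current_versions = [] then "1.0.0"
  else
    let versions := current_versions.foldl
      (fun acc v => match pvParseVer v with
        | some t => acc ++ [t]
        | none => acc) []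
    if versions = [] then "1.0.0"
    else
      match PySem.List.sorted versions pvKey true with
      | [] => "1.0.0"   -- unreachable: sorted of a nonempty list is nonempty
      | (major, minor, patch) :: _ =>
        PySem.Int.toStr major ++ "." ++ PySem.Int.toStr minor ++ "." ++ PySem.Int.toStr (patch + 1)

-- ===== PORT B =====
-- Python's 'cand > best' on 3-tuples, written out lexicographically
def pvTupGt (x y : Int × Int × Int) : Bool :=
  x.1 > y.1 || (x.1 = y.1 && (x.2.1 > y.2.1 || (x.2.1 = y.2.1 && x.2.2 > y.2.2)))

-- the loop body's 'if best is None or cand > best: best = cand'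
def pvStep (best : Option (Int × Int × Int)) (cand : Int × Int × Int) : Option (Int × Int × Int) :=
  match best with
  | none => some cand
  | some b => if pvTupGt cand b then some cand else some b

def generate_next_version_py_alt (current_versions : List String) : String :=
  let best := current_versions.foldl
    (fun best v => match pvParseVer v with
      | none => best
      | some cand => pvStep best cand) none
  match best with
  | none => "1.0.0"
  | some (major, minor, patch) =>
    PySem.Int.toStr major ++ "." ++ PySem.Int.toStr minor ++ "." ++ PySem.Int.toStr (patch + 1)

-- ===== PRECONDITION & SPEC =====
def Spec_generate_next_version_py (current_versions : List String) (out : String) : Prop := out = generate_next_version_py_alt current_versions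
instance (current_versions : List String) (out : String) : Decidable (Spec_generate_next_version_py current_versions out) := by unfold Spec_generate_next_version_py; infer_instance

-- ===== CLAIM (what is proved, stated in full; the proofs are below) =====
def Claim_equal_generate_next_version_py : Prop := ∀ (current_versions : List String), Dom_generate_next_version_py current_versions → Spec_generate_next_version_py current_versions (generate_next_version_py current_versions)

-- ===== LEMMAS AND PROOFS =====

-- the parsed tuples, as a filterMap
def pvVers (cvs : List String) : List (Int × Int × Int) := cvs.filterMap pvParseVer

lemma pvA_foldl (cvs : List String) (acc : List (Int × Int × Int)) :
    cvs.foldl (fun acc v => match pvParseVer v with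
        | some t => acc ++ [t]
        | none => acc) acc = acc ++ pvVers cvs := by
  induction cvs generalizing acc with
  | nil => simp [pvVers]
  | cons v vs ih =>
    simp only [List.foldl_cons, pvVers, List.filterMap_cons]
    cases pvParseVer v <;> simp [ih, pvVers]

lemma pvB_foldl (cvs : List String) (best : Option (Int × Int × Int)) :
    cvs.foldl (fun best v => match pvParseVer v with
      | none => best
      | some cand => pvStep best cand) best = (pvVers cvs).foldl pvStep best := by
  induction cvs generalizing best with
  | nil => simp [pvVers]
  | cons v vs ih =>
    simp only [List.foldl_cons, pvVers, List.filterMap_cons]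
    cases pvParseVer v <;> simp [ih, pvVers]

lemma pvTupGt_iff (x y : Int × Int × Int) : pvTupGt x y = true ↔ pvKey y < pvKey x := by
  obtain ⟨a, b, c⟩ := x
  obtain ⟨d, e, f⟩ := y
  simp only [pvTupGt, pvKey, Prod.Lex.toLex_lt_toLex, Bool.or_eq_true, Bool.and_eq_true,
    decide_eq_true_eq, gt_iff_lt]
  omega

lemma pvStep_max (vs : List (Int × Int × Int)) (b : Int × Int × Int) :
    ∃ m, vs.foldl pvStep (some b) = some m ∧ m ∈ b :: vs ∧ ∀ y ∈ b :: vs, pvKey y ≤ pvKey m := by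
  induction vs generalizing b with
  | nil => exact ⟨b, rfl, by simp, by simp⟩
  | cons t ts ih =>
    by_cases h : pvTupGt t b = true
    · obtain ⟨m, hm, hmem, hmax⟩ := ih t
      refine ⟨m, by simpa [pvStep, h] using hm, ?_, ?_⟩
      · simp only [List.mem_cons] at hmem ⊢
        tauto
      · intro y hy
        simp only [List.mem_cons] at hy
        rcases hy with rfl | rfl | hy
        · exact le_trans ((pvTupGt_iff t _).mp h).le (hmax t (by simp))
        · exact hmax _ (by simp)
        · exact hmax y (by simp [hy])
    · obtain ⟨m, hm, hmem, hmax⟩ := ih b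
      refine ⟨m, by simpa [pvStep, h] using hm, ?_, ?_⟩
      · simp only [List.mem_cons] at hmem ⊢
        tauto
      · intro y hy
        simp only [List.mem_cons] at hy
        rcases hy with rfl | rfl | hy
        · exact hmax _ (by simp)
        · have hle : pvKey y ≤ pvKey b := not_lt.mp (fun hc => h ((pvTupGt_iff y b).mpr hc))
          exact le_trans hle (hmax b (by simp))
        · exact hmax y (by simp [hy])

lemma pvKey_injective : Function.Injective pvKey := by
  intro x y h
  obtain ⟨a, b, c⟩ := x
  obtain ⟨d, e, f⟩ := y
  simp only [pvKey] at h
  have h1 := congrArg (fun z => (ofLex z).1) h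
  have h2 := congrArg (fun z => (ofLex (ofLex z).2).1) h
  have h3 := congrArg (fun z => (ofLex (ofLex z).2).2) h
  simp at h1 h2 h3
  simp [h1, h2, h3]

theorem generate_next_version_py_spec : Claim_equal_generate_next_version_py := by
  unfold Claim_equal_generate_next_version_py
  intro cvs _
  unfold Spec_generate_next_version_py generate_next_version_py generate_next_version_py_alt
  simp only [pvA_foldl, pvB_foldl, List.nil_append]
  by_cases hnil : cvs = []
  · simp [hnil, pvVers]
  · simp only [if_neg hnil]
    by_cases hv : pvVers cvs = []
    · simp [hv]
    · simp only [if_neg hv]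
      obtain ⟨t, ts, hts⟩ := List.exists_cons_of_ne_nil hv
      rw [hts]
      simp only [List.foldl_cons, pvStep]
      obtain ⟨m, hm, hmem, hmax⟩ := pvStep_max ts t
      rw [hm]
      have hsne : PySem.List.sorted (t :: ts) pvKey true ≠ [] := by
        simp [PySem.List.sorted_eq_nil_iff]
      obtain ⟨hd, tl, hhd⟩ := List.exists_cons_of_ne_nil hsne
      rw [hhd]
      have hhd_mem : hd ∈ t :: ts := by
        have hperm := PySem.List.sorted_perm (xs := t :: ts) (key := pvKey) (rev := true)
        exact hperm.mem_iff.mp (by simp [hhd])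
      have h1 : pvKey hd ≤ pvKey m := hmax hd hhd_mem
      have h2 : pvKey m ≤ pvKey hd :=
        PySem.List.key_head_sorted_rev_ge _ _ hhd m hmem
      have heq : hd = m := pvKey_injective (le_antisymm h1 h2)
      subst heq
      obtain ⟨a, b, c⟩ := hd
      rfl
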